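-- pv_equiv track=rewrite | github.com/meganclapinski25/technical-interview | beautiful-pairs.py | count_beautiful_pairs
-- ===== SOURCE A (Python) =====
-- def gcd(a, b):
--     while b:
--         a, b = b, a % b
--     return a
--
-- def is_coprime(x, y):
--     return gcd(x, y) == 1
--
-- def count_beautiful_pairs(nums):
--     count = 0
--     n = len(nums)
--     for i in range(n):
--         for j in range(i+1, n):
--             if is_coprime(nums[i] // 10, nums[j] % 10):
--                 count += 1
--     return count
-- ===== SOURCE B (Python) =====
-- # Suffix histogram of the 10 possible last digits: one pass, 10 gcd checks per element.
-- def _coprime(a, b):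
--     while b:
--         a, b = b, a % b
--     return a == 1
--
-- def count_beautiful_pairs(nums):
--     counts = [0] * 10
--     for v in nums:
--         counts[v % 10] += 1
--     total = 0
--     for v in nums:
--         counts[v % 10] -= 1
--         x = v // 10
--         for d in range(10):
--             if _coprime(x, d):
--                 total += counts[d]
--     return total
-- ===== Notes on version B (the rewrite author's own statement) =====
-- stated objective: faster
-- what changed: Replaced the O(n^2) all-pairs double loop by a single pass that maintains a 10-bucket histogram of the last digits of the remaining suffix, doing at most 10 gcd checks per element.
import Mathlib
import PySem

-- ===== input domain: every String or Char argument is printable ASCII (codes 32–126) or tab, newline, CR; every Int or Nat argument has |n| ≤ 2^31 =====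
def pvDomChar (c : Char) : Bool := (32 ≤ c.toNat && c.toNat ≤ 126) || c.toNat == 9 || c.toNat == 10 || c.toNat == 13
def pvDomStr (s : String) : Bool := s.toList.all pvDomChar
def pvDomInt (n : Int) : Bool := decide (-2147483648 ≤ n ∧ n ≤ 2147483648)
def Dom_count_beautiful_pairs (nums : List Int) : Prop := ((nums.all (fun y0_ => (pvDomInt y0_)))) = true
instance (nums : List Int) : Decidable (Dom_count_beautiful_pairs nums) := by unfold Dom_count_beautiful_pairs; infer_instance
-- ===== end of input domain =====

-- B replaces A's O(n^2) all-pairs scan by a sliding 10-bucket last-digit histogram (10 gcd checks per element).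

-- ===== PORT A =====
-- Python's `while b: a, b = b, a % b; return a` (PySem.Int.mod = Python %)
def gcdPy (a b : Int) : Int :=
  if h : b = 0 then a else gcdPy b (PySem.Int.mod a b)
termination_by b.natAbs
decreasing_by
  rcases lt_or_gt_of_ne h with hb | hb
  · have := PySem.Int.mod_neg_bounds a hb; omega
  · have h1 := PySem.Int.mod_nonneg a hb
    have h2 := PySem.Int.mod_lt a hb
    omega

def isCoprimePy (x y : Int) : Bool := gcdPy x y == 1

def count_beautiful_pairs (nums : List Int) : Int :=
  let n := PySem.List.len nums
  List.foldl (fun count i =>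
      List.foldl (fun count j =>
          if isCoprimePy (PySem.Int.floordiv (PySem.List.pyGetD nums i 0) 10)
                         (PySem.Int.mod (PySem.List.pyGetD nums j 0) 10)
          then count + 1 else count)
        count (PySem.List.pyRange (i + 1) n))
    0 (PySem.List.pyRange 0 n)

-- ===== PORT B =====
-- counts[v % 10] += 1  (v % 10 ∈ [0,10), so .toNat is exact)
def bumpDigit (c : List Int) (v : Int) : List Int :=
  let d := (PySem.Int.mod v 10).toNat
  c.set d (c.getD d 0 + 1)

-- counts[v % 10] -= 1
def dropDigit (c : List Int) (v : Int) : List Int :=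
  let d := (PySem.Int.mod v 10).toNat
  c.set d (c.getD d 0 - 1)

-- one iteration of B's main loop: decrement the bucket, then add the 10 coprime buckets
def altStep (st : Int × List Int) (v : Int) : Int × List Int :=
  let c := dropDigit st.2 v
  let x := PySem.Int.floordiv v 10
  let tot := List.foldl (fun t d => if isCoprimePy x d then t + PySem.List.pyGetD c d 0 else t)
    st.1 (PySem.List.pyRange 0 10)
  (tot, c)

def count_beautiful_pairs_alt (nums : List Int) : Int :=
  let counts := List.foldl bumpDigit (List.replicate 10 0) nums
  (List.foldl altStep (0, counts) nums).1

-- ===== PRECONDITION & SPEC =====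
def Spec_count_beautiful_pairs (nums : List Int) (out : Int) : Prop := out = count_beautiful_pairs_alt nums
instance (nums : List Int) (out : Int) : Decidable (Spec_count_beautiful_pairs nums out) := by unfold Spec_count_beautiful_pairs; infer_instance

-- ===== CLAIM (what is proved, stated in full; the proofs are below) =====
def Claim_equal_count_beautiful_pairs : Prop := ∀ (nums : List Int), Dom_count_beautiful_pairs nums → Spec_count_beautiful_pairs nums (count_beautiful_pairs nums)

-- ===== LEMMAS AND PROOFS =====

-- reference value: for each element, count its beautiful partners to its right
def pairCount : List Int → Int
  | [] => 0
  | v :: rest =>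
      ((rest.countP (fun w => isCoprimePy (PySem.Int.floordiv v 10) (PySem.Int.mod w 10)) : Nat) : Int)
      + pairCount rest

-- number of elements of l whose last digit is d
def cntd (l : List Int) (d : Nat) : Int :=
  ((l.countP (fun w => (PySem.Int.mod w 10).toNat == d) : Nat) : Int)

theorem mod10_bounds (v : Int) : 0 ≤ PySem.Int.mod v 10 ∧ PySem.Int.mod v 10 < 10 :=
  ⟨PySem.Int.mod_nonneg v (by norm_num), PySem.Int.mod_lt v (by norm_num)⟩

theorem getD_set_eq (c : List Int) (e d : Nat) (x : Int) (he : e < c.length) :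
    (c.set e x).getD d 0 = if e = d then x else c.getD d 0 := by
  simp only [List.getD, List.getElem?_set]
  split_ifs with h1 h2 <;> simp_all

-- ---- A-side: the double index loop computes pairCount ----

theorem innerA (nums : List Int) (x acc : Int) (k : Nat) :
    List.foldl (fun count j =>
        if isCoprimePy (PySem.Int.floordiv x 10)
                       (PySem.Int.mod (PySem.List.pyGetD nums j 0) 10)
        then count + 1 else count)
      acc (PySem.List.pyRange (k : Int) (PySem.List.len nums))
    = acc + (((nums.drop k).countP
        (fun w => isCoprimePy (PySem.Int.floordiv x 10) (PySem.Int.mod w 10)) : Nat) : Int) := by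
  have h := PySem.List.foldl_pyRange_pyGetD nums 0
    (fun acc w => if isCoprimePy (PySem.Int.floordiv x 10) (PySem.Int.mod w 10)
                  then acc + 1 else acc) acc (a := (k : Int)) (by positivity)
  simp only [Int.toNat_natCast] at h
  rw [h]
  exact PySem.List.foldl_count_if _ _ _

theorem outerA (nums : List Int) : ∀ (m k : Nat) (acc : Int),
    nums.length - k = m → k ≤ nums.length →
    List.foldl (fun count i =>
        List.foldl (fun count j =>
            if isCoprimePy (PySem.Int.floordiv (PySem.List.pyGetD nums i 0) 10)
                           (PySem.Int.mod (PySem.List.pyGetD nums j 0) 10)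
            then count + 1 else count)
          count (PySem.List.pyRange (i + 1) (PySem.List.len nums)))
      acc (PySem.List.pyRange (k : Int) (PySem.List.len nums))
    = acc + pairCount (nums.drop k) := by
  intro m
  induction m with
  | zero =>
    intro k acc hm hk
    have hkl : k = nums.length := by omega
    have hnil : PySem.List.pyRange (k : Int) (PySem.List.len nums) = [] := by
      rw [List.eq_nil_iff_forall_not_mem]
      intro x hx
      rw [PySem.List.mem_pyRange_one, PySem.List.len_eq] at hx
      omega
    simp [hkl, pairCount]
  | succ m ih =>
    intro k acc hm hk
    have hklt : k < nums.length := by omega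
    have hcons : PySem.List.pyRange (k : Int) (PySem.List.len nums)
        = (k : Int) :: PySem.List.pyRange ((k : Int) + 1) (PySem.List.len nums) := by
      apply PySem.List.pyRange_one_cons
      rw [PySem.List.len_eq]; exact_mod_cast hklt
    rw [hcons, List.foldl_cons]
    have hcast : ((k : Int) + 1) = ((k + 1 : Nat) : Int) := by push_cast; ring
    rw [hcast, innerA nums (PySem.List.pyGetD nums (k : Int) 0) acc (k + 1)]
    rw [ih (k + 1) _ (by omega) (by omega)]
    rw [List.drop_eq_getElem_cons hklt]
    simp only [pairCount, PySem.List.pyGetD_natCast, List.getD_eq_getElem nums 0 hklt]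
    ring

-- ---- B-side: histogram construction ----

theorem hist_spec : ∀ (l : List Int) (c : List Int), c.length = 10 →
    (List.foldl bumpDigit c l).length = 10 ∧
    (∀ d : Nat, d < 10 → (List.foldl bumpDigit c l).getD d 0 = c.getD d 0 + cntd l d) := by
  intro l
  induction l with
  | nil => intro c hc; refine ⟨hc, ?_⟩; intro d _; simp [cntd]
  | cons v rest ih =>
    intro c hc
    have hb := mod10_bounds v
    have he : (PySem.Int.mod v 10).toNat < c.length := by omega
    have hc' : (bumpDigit c v).length = 10 := by simp [bumpDigit, hc]
    obtain ⟨hlen, hval⟩ := ih (bumpDigit c v) hc'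
    refine ⟨by simpa [List.foldl_cons] using hlen, ?_⟩
    intro d hd
    rw [List.foldl_cons, hval d hd]
    have hset : (bumpDigit c v).getD d 0
        = if (PySem.Int.mod v 10).toNat = d then c.getD d 0 + 1 else c.getD d 0 := by
      rw [bumpDigit, getD_set_eq c _ d _ he]
      split_ifs with h
      · rw [h]
      · rfl
    rw [hset]
    have hcnt : cntd (v :: rest) d = cntd rest d
        + (if (PySem.Int.mod v 10).toNat = d then 1 else 0) := by
      simp only [cntd, List.countP_cons, beq_iff_eq]
      split_ifs with h <;> push_cast <;> ring
    rw [hcnt]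
    split_ifs <;> ring

-- ---- B-side: the 10-bucket scan counts exactly the beautiful partners in l ----

theorem ite_split (c : Prop) [Decidable c] (a b : Int) :
    (if c then a + b else 0) = (if c then a else 0) + (if c then b else 0) := by
  split_ifs <;> simp

theorem sumcnt (l : List Int) (x : Int) :
    (if isCoprimePy x 0 then cntd l 0 else 0)
    + (if isCoprimePy x 1 then cntd l 1 else 0)
    + (if isCoprimePy x 2 then cntd l 2 else 0)
    + (if isCoprimePy x 3 then cntd l 3 else 0)
    + (if isCoprimePy x 4 then cntd l 4 else 0)
    + (if isCoprimePy x 5 then cntd l 5 else 0)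
    + (if isCoprimePy x 6 then cntd l 6 else 0)
    + (if isCoprimePy x 7 then cntd l 7 else 0)
    + (if isCoprimePy x 8 then cntd l 8 else 0)
    + (if isCoprimePy x 9 then cntd l 9 else 0)
    = ((l.countP (fun w => isCoprimePy x (PySem.Int.mod w 10)) : Nat) : Int) := by
  induction l with
  | nil => simp [cntd]
  | cons w rest ih =>
    have hcnt : ∀ d : Nat, cntd (w :: rest) d = cntd rest d
        + (if (PySem.Int.mod w 10).toNat = d then 1 else 0) := by
      intro d
      simp only [cntd, List.countP_cons, beq_iff_eq]
      split_ifs with h <;> push_cast <;> ring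
    have hb2 := mod10_bounds w
    have hone : (if isCoprimePy x 0 then if (PySem.Int.mod w 10).toNat = 0 then (1:Int) else 0 else 0)
        + (if isCoprimePy x 1 then if (PySem.Int.mod w 10).toNat = 1 then (1:Int) else 0 else 0)
        + (if isCoprimePy x 2 then if (PySem.Int.mod w 10).toNat = 2 then (1:Int) else 0 else 0)
        + (if isCoprimePy x 3 then if (PySem.Int.mod w 10).toNat = 3 then (1:Int) else 0 else 0)
        + (if isCoprimePy x 4 then if (PySem.Int.mod w 10).toNat = 4 then (1:Int) else 0 else 0)
        + (if isCoprimePy x 5 then if (PySem.Int.mod w 10).toNat = 5 then (1:Int) else 0 else 0)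
        + (if isCoprimePy x 6 then if (PySem.Int.mod w 10).toNat = 6 then (1:Int) else 0 else 0)
        + (if isCoprimePy x 7 then if (PySem.Int.mod w 10).toNat = 7 then (1:Int) else 0 else 0)
        + (if isCoprimePy x 8 then if (PySem.Int.mod w 10).toNat = 8 then (1:Int) else 0 else 0)
        + (if isCoprimePy x 9 then if (PySem.Int.mod w 10).toNat = 9 then (1:Int) else 0 else 0)
        = (if isCoprimePy x (PySem.Int.mod w 10) then (1:Int) else 0) := by
      obtain ⟨hbl, hbr⟩ := hb2
      set m := PySem.Int.mod w 10 with hm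
      interval_cases m <;> simp
    simp only [hcnt, ite_split, List.countP_cons]
    push_cast
    omega

theorem sum10 (x t : Int) (l : List Int) (c : List Int)
    (hc : ∀ d : Nat, d < 10 → c.getD d 0 = cntd l d) :
    List.foldl (fun t d => if isCoprimePy x d then t + PySem.List.pyGetD c d 0 else t)
      t (PySem.List.pyRange 0 10)
    = t + ((l.countP (fun w => isCoprimePy x (PySem.Int.mod w 10)) : Nat) : Int) := by
  have hb : (fun (t d : Int) => if isCoprimePy x d then t + PySem.List.pyGetD c d 0 else t)
      = (fun t d => t + (if isCoprimePy x d then PySem.List.pyGetD c d 0 else 0)) := by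
    funext t d; split_ifs <;> simp
  have hrange : PySem.List.pyRange 0 10 = [0,1,2,3,4,5,6,7,8,9] := by decide
  rw [hb, PySem.List.foldl_add, hrange]
  simp only [List.map_cons, List.map_nil, List.sum_cons, List.sum_nil,
    PySem.List.pyGetD_ofNat']
  rw [hc 0 (by norm_num), hc 1 (by norm_num), hc 2 (by norm_num), hc 3 (by norm_num),
      hc 4 (by norm_num), hc 5 (by norm_num), hc 6 (by norm_num), hc 7 (by norm_num),
      hc 8 (by norm_num), hc 9 (by norm_num)]
  have hs := sumcnt l x
  omega

-- ---- B-side: the main loop ----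

theorem loop2 : ∀ (l : List Int) (tot : Int) (c : List Int), c.length = 10 →
    (∀ d : Nat, d < 10 → c.getD d 0 = cntd l d) →
    (List.foldl altStep (tot, c) l).1 = tot + pairCount l := by
  intro l
  induction l with
  | nil => intro tot c _ _; simp [pairCount]
  | cons v rest ih =>
    intro tot c hlen hc
    have hb := mod10_bounds v
    have he : (PySem.Int.mod v 10).toNat < c.length := by omega
    have hc' : ∀ d : Nat, d < 10 → (dropDigit c v).getD d 0 = cntd rest d := by
      intro d hd
      have hcd := hc d hd
      have hcnt : cntd (v :: rest) d = cntd rest d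
          + (if (PySem.Int.mod v 10).toNat = d then 1 else 0) := by
        simp only [cntd, List.countP_cons, beq_iff_eq]
        split_ifs with h <;> push_cast <;> ring
      rw [dropDigit, getD_set_eq c _ d _ he]
      split_ifs with h
      · rw [h, hcd, hcnt, if_pos h]; ring
      · rw [hcd, hcnt, if_neg h]; ring
    have hlen' : (dropDigit c v).length = 10 := by simp [dropDigit, hlen]
    rw [List.foldl_cons]
    have hstep : altStep (tot, c) v
        = (tot + ((rest.countP (fun w => isCoprimePy (PySem.Int.floordiv v 10) (PySem.Int.mod w 10)) : Nat) : Int), dropDigit c v) := by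
      simp only [altStep]
      rw [sum10 (PySem.Int.floordiv v 10) tot rest (dropDigit c v) hc']
    rw [hstep, ih _ _ hlen' hc']
    simp only [pairCount]
    ring

-- ---- the two ports both compute pairCount ----

theorem a_eq_pairCount (nums : List Int) : count_beautiful_pairs nums = pairCount nums := by
  have h := outerA nums nums.length 0 0 (by omega) (by omega)
  simpa [count_beautiful_pairs] using h

theorem b_eq_pairCount (nums : List Int) : count_beautiful_pairs_alt nums = pairCount nums := by
  have h0 : (List.replicate 10 (0:Int)).length = 10 := by simp
  obtain ⟨hlen, hval⟩ := hist_spec nums (List.replicate 10 0) h0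
  have hc : ∀ d : Nat, d < 10 → (List.foldl bumpDigit (List.replicate 10 0) nums).getD d 0 = cntd nums d := by
    intro d hd
    rw [hval d hd]
    simp only [List.getD, List.getElem?_replicate]
    rw [if_pos hd]
    simp
  have h := loop2 nums 0 (List.foldl bumpDigit (List.replicate 10 0) nums) hlen hc
  simpa [count_beautiful_pairs_alt] using h

-- ===== VERDICT (by name: the statement is the Claim_ definition above) =====
theorem count_beautiful_pairs_spec : Claim_equal_count_beautiful_pairs := by
  intro nums _
  unfold Spec_count_beautiful_pairs
  rw [a_eq_pairCount, b_eq_pairCount]
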